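-- pv_equiv track=rewrite | github.com/hoahai/fastapi | apps/tradsphere/api/v1/helpers/dbQueries.py | _normalized_text_cache_values
-- ===== SOURCE A (Python) =====
-- def _normalized_text_cache_values(values: list[str]) -> list[str]:
--     seen: set[str] = set()
--     normalized: list[str] = []
--     for value in values:
--         text = str(value or "").strip()
--         if not text or text in seen:
--             continue
--         seen.add(text)
--         normalized.append(text)
--     return sorted(normalized)
-- ===== SOURCE B (Python) =====
-- def _normalized_text_cache_values(values: list[str]) -> list[str]:
--     texts = sorted(t for t in (str(v or "").strip() for v in values) if t)
--     out: list[str] = []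
--     for t in texts:
--         if not out or out[-1] != t:
--             out.append(t)
--     return out
-- ===== Notes on version B (the rewrite author's own statement) =====
-- stated objective: alternative
-- what changed: Replaces the seen-set first-occurrence dedup followed by sorting with sort-first then a single adjacency-based dedup pass, dropping the hash set entirely.
import Mathlib
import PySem

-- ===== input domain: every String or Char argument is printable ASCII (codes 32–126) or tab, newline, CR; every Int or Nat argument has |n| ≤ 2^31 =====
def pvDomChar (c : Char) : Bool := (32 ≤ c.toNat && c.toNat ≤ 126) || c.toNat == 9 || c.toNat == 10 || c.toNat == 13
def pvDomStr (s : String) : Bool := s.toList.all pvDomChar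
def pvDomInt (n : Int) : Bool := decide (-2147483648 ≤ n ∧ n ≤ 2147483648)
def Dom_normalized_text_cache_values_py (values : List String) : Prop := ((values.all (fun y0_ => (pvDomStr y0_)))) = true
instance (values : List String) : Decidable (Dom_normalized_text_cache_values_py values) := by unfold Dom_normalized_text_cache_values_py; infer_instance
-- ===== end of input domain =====

-- B sorts the stripped non-empty texts first and removes duplicates in one adjacency pass,
-- instead of A's seen-set dedup followed by sorting (alternative decomposition, same cost).

-- ===== PORT A =====
-- loop body of A: text = str(value or "").strip(); skip empty/seen, else add to seen and append
def pvStepA (p : PySem.Set String × List String) (value : String) : PySem.Set String × List String :=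
  let text := PySem.Str.strip (if value = "" then "" else value)
  if text = "" ∨ PySem.Set.contains p.1 text then p
  else (PySem.Set.add p.1 text, p.2 ++ [text])

def normalized_text_cache_values_py (values : List String) : List String :=
  let p := values.foldl pvStepA (PySem.Set.empty, [])
  PySem.List.sorted p.2 (fun x => x) false

-- ===== PORT B =====
-- loop body of B: if not out or out[-1] != t: out.append(t)
def pvStepB (out : List String) (t : String) : List String :=
  if out = [] ∨ PySem.List.pyGet? out (-1) ≠ some t then out ++ [t] else out

def normalized_text_cache_values_py_alt (values : List String) : List String :=
  let texts := PySem.List.sorted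
    ((values.map (fun v => PySem.Str.strip (if v = "" then "" else v))).filter
      (fun t => !(t = ""))) (fun x => x) false
  texts.foldl pvStepB []

-- ===== PRECONDITION & SPEC =====
def Spec_normalized_text_cache_values_py (values : List String) (out : List String) : Prop := out = normalized_text_cache_values_py_alt values
instance (values : List String) (out : List String) : Decidable (Spec_normalized_text_cache_values_py values out) := by unfold Spec_normalized_text_cache_values_py; infer_instance

-- ===== CLAIM (what is proved, stated in full; the proofs are below) =====
def Claim_equal_normalized_text_cache_values_py : Prop := ∀ (values : List String), Dom_normalized_text_cache_values_py values → Spec_normalized_text_cache_values_py values (normalized_text_cache_values_py values)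

-- ===== LEMMAS AND PROOFS =====

-- the stripped non-empty texts, in input order (shared shape of both ports after normalisation)
def pvTexts (values : List String) : List String :=
  (values.map PySem.Str.strip).filter (fun t => !(t = ""))

theorem pv_strip_or (v : String) :
    PySem.Str.strip (if v = "" then "" else v) = PySem.Str.strip v := by
  split
  · next h => rw [h]
  · rfl

-- on a diagonal state, A's loop body is folding Set.add over the non-empty stripped text
theorem pv_stepA_diag (acc : List String) (v : String) :
    pvStepA (acc, acc) v
    = (if PySem.Str.strip v = "" then acc else PySem.Set.add acc (PySem.Str.strip v),
       if PySem.Str.strip v = "" then acc else PySem.Set.add acc (PySem.Str.strip v)) := by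
  simp only [pvStepA, pv_strip_or]
  by_cases h0 : PySem.Str.strip v = ""
  · simp [h0]
  · by_cases hm : PySem.Str.strip v ∈ acc <;>
      simp [PySem.Set.add, PySem.Set.contains, h0, hm]

theorem pv_foldA (values : List String) (acc : List String) :
    values.foldl pvStepA (acc, acc)
    = ((pvTexts values).foldl PySem.Set.add acc, (pvTexts values).foldl PySem.Set.add acc) := by
  induction values generalizing acc with
  | nil => rfl
  | cons v vs ih =>
    rw [List.foldl_cons, pv_stepA_diag]
    by_cases h0 : PySem.Str.strip v = ""
    · rw [if_pos h0, ih acc]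
      simp [pvTexts, h0]
    · rw [if_neg h0, ih (PySem.Set.add acc (PySem.Str.strip v))]
      simp [pvTexts, h0]

-- B's loop body, phrased via getLast?
theorem pv_stepB_eq (out : List String) (t : String) :
    pvStepB out t = if out.getLast? = some t then out else out ++ [t] := by
  simp only [pvStepB, PySem.List.pyGet?_neg_one]
  by_cases h : out.getLast? = some t
  · have hne : out ≠ [] := by intro he; rw [he] at h; simp at h
    simp [h, hne]
  · simp [h]

-- elements of a strictly increasing list are ≤ its last element
theorem pv_le_getLast {acc : List String} (hp : acc.Pairwise (· < ·))
    {g : String} (hg : acc.getLast? = some g) : ∀ a ∈ acc, a ≤ g := by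
  rcases (List.getLast?_eq_some_iff).1 hg with ⟨l', rfl⟩
  intro a ha
  rcases List.mem_append.1 ha with h | h
  · exact le_of_lt ((List.pairwise_append.1 hp).2.2 a h g (List.mem_singleton_self g))
  · simp_all

-- invariant of B's adjacency-dedup fold: it stays strictly increasing and collects exactly the members
theorem pv_adj_inv (l : List String) :
    ∀ acc : List String, l.Pairwise (· ≤ ·) → acc.Pairwise (· < ·) →
    (∀ a ∈ acc, ∀ b ∈ l, a ≤ b) →
    (l.foldl pvStepB acc).Pairwise (· < ·)
    ∧ (∀ x, x ∈ l.foldl pvStepB acc ↔ x ∈ acc ∨ x ∈ l) := by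
  induction l with
  | nil => intro acc _ hacc _; simpa using hacc
  | cons t rest ih =>
    intro acc hl hacc hle
    have hrest : rest.Pairwise (· ≤ ·) := hl.of_cons
    have htle : ∀ b ∈ rest, t ≤ b := fun b hb => List.rel_of_pairwise_cons hl hb
    rw [List.foldl_cons, pv_stepB_eq]
    by_cases h : acc.getLast? = some t
    · rw [if_pos h]
      have htacc : t ∈ acc := List.mem_of_getLast? h
      obtain ⟨h1, h2⟩ := ih acc hrest hacc (fun a ha b hb => hle a ha b (List.mem_cons_of_mem t hb))
      refine ⟨h1, fun x => ?_⟩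
      rw [h2 x]
      constructor
      · rintro (hx | hx)
        · exact Or.inl hx
        · exact Or.inr (List.mem_cons_of_mem t hx)
      · rintro (hx | hx)
        · exact Or.inl hx
        · rcases List.mem_cons.1 hx with rfl | hx
          · exact Or.inl htacc
          · exact Or.inr hx
    · rw [if_neg h]
      -- every element of acc is strictly below t
      have hlt : ∀ a ∈ acc, a < t := by
        intro a ha
        obtain ⟨g, hg⟩ := Option.isSome_iff_exists.mp
          (List.getLast?_isSome.mpr (List.ne_nil_of_mem ha))
        have hag : a ≤ g := pv_le_getLast hacc hg a ha
        have hgt : g ≤ t := hle g (List.mem_of_getLast? hg) t (List.mem_cons_self)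
        have hgne : g ≠ t := fun he => h (he ▸ hg)
        exact lt_of_le_of_lt hag (lt_of_le_of_ne hgt hgne)
      have hacc' : (acc ++ [t]).Pairwise (· < ·) := by
        rw [List.pairwise_append]
        exact ⟨hacc, List.pairwise_singleton _ _, fun a ha b hb => by
          rcases List.mem_singleton.1 hb with rfl; exact hlt a ha⟩
      have hle' : ∀ a ∈ acc ++ [t], ∀ b ∈ rest, a ≤ b := by
        intro a ha b hb
        rcases List.mem_append.1 ha with ha | ha
        · exact hle a ha b (List.mem_cons_of_mem t hb)
        · rcases List.mem_singleton.1 ha with rfl; exact htle b hb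
      obtain ⟨h1, h2⟩ := ih (acc ++ [t]) hrest hacc' hle'
      refine ⟨h1, fun x => ?_⟩
      rw [h2 x]
      simp only [List.mem_append, List.mem_cons]
      tauto

-- sorting the deduplicated texts equals adjacency-deduplicating the sorted texts
theorem pv_main (ts : List String) :
    PySem.List.sorted (PySem.Set.ofList ts) (fun x => x) false
    = (PySem.List.sorted ts (fun x => x) false).foldl pvStepB [] := by
  have hpair : (PySem.List.sorted ts (fun x => x) false).Pairwise (· ≤ ·) :=
    PySem.List.sorted_pairwise ts (fun x => x)
  obtain ⟨h1, h2⟩ := pv_adj_inv (PySem.List.sorted ts (fun x => x) false) []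
    hpair List.Pairwise.nil (by intro a ha; simp at ha)
  refine PySem.List.sorted_eq_of_perm_of_pairwise_lt _ _ (fun x => x) ?_ ?_
  · rw [List.perm_ext_iff_of_nodup (h1.imp ne_of_lt) (PySem.Set.nodup_ofList ts)]
    intro x
    rw [h2 x]
    simp [PySem.Set.mem_ofList, PySem.List.mem_sorted]
  · exact h1

-- ===== VERDICT (by name: the statement is the Claim_ definition above) =====
theorem normalized_text_cache_values_py_spec : Claim_equal_normalized_text_cache_values_py := by
  intro values _
  unfold Spec_normalized_text_cache_values_py normalized_text_cache_values_py normalized_text_cache_values_py_alt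
  have hfoldA := pv_foldA values []
  show PySem.List.sorted (values.foldl pvStepA (PySem.Set.empty, [])).2 (fun x => x) false = _
  have hempty : (PySem.Set.empty : PySem.Set String) = ([] : List String) := rfl
  rw [hempty, hfoldA, ← PySem.Set.ofList_eq_foldl]
  have hts : (values.map (fun v => PySem.Str.strip (if v = "" then "" else v))).filter
      (fun t => !(t = "")) = pvTexts values := by
    simp only [pvTexts, pv_strip_or]
  show PySem.List.sorted (PySem.Set.ofList (pvTexts values)) (fun x => x) false = _
  rw [hts, pv_main (pvTexts values)]
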